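-- pv_equiv track=rewrite | github.com/nastyh/LeetCode | Basic Data Structures/1551_Minimum_Operations_to_Make_Array_Equal.py | minOperations_median
-- ===== SOURCE A (Python) =====
-- def minOperations_median(n):  # O(N) both
--     """
--     The middle element is the best candidate to change every other element.
--     If there are an even number of numbers in the list, change every element to the average of the two middle elements
--     """
--     output = 0
--     if n == 1:
--         return output
--     arr = []
--     for i in range(n):
--         arr.append(2 * i + 1)
--     if n % 2 == 0:
--         output += 1     # middle 2 guys
--         middle = arr[n//2] - 1   # given every two elements are separated by 2 numbers, middle would just be bigger number minus 1.
--         for j in range(n//2 + 1, n):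
--             output += arr[j] - middle
--     else:
--         middle = arr[n//2]
--         for j in range(n // 2 + 1, n):
--             output += arr[j] - middle
--     return output
-- ===== SOURCE B (Python) =====
-- def minOperations_median(n):
--     # Closed form: sum_{j>n//2} (2j+1 - median) telescopes to floor(n^2/4).
--     return n * n // 4
-- ===== Notes on version B (the rewrite author's own statement) =====
-- stated objective: faster
-- what changed: Replaced the O(n) loop that materialises the array [1,3,...,2n-1] and sums distances to the median with the closed-form formula n*n//4.
-- outside the precondition, e.g. on minOperations_median(0): A raises IndexError, B returns 0
import Mathlib
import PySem

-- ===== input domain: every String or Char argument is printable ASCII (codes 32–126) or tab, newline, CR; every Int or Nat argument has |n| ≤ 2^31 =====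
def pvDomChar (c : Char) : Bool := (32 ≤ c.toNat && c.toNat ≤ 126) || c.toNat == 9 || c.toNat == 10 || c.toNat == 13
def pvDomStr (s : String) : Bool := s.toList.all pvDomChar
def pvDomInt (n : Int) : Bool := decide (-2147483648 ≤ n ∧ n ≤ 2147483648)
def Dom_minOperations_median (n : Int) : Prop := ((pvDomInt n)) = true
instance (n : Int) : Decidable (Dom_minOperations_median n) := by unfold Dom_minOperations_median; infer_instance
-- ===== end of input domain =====

-- B replaces A's O(n) array-building loop with the closed form n*n//4 (O(1)).

-- ===== PORT A =====
def minOperations_median (n : Int) : Int :=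
  let output : Int := 0
  if n == 1 then output
  else
    let arr : List Int :=
      (PySem.List.pyRange 0 n 1).foldl (fun a i => a ++ [2 * i + 1]) []
    if PySem.Int.mod n 2 == 0 then
      let output := output + 1
      let middle := PySem.List.pyGetD arr (PySem.Int.floordiv n 2) 0 - 1
      (PySem.List.pyRange (PySem.Int.floordiv n 2 + 1) n 1).foldl
        (fun o j => o + (PySem.List.pyGetD arr j 0 - middle)) output
    else
      let middle := PySem.List.pyGetD arr (PySem.Int.floordiv n 2) 0
      (PySem.List.pyRange (PySem.Int.floordiv n 2 + 1) n 1).foldl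
        (fun o j => o + (PySem.List.pyGetD arr j 0 - middle)) output

-- ===== PORT B =====
def minOperations_median_alt (n : Int) : Int :=
  PySem.Int.floordiv (n * n) 4

-- ===== PRECONDITION & SPEC =====
-- A indexes into the built array; for n ≤ 0 the array is empty and A raises IndexError.
def Pre_minOperations_median (n : Int) : Prop := 1 ≤ n
instance (n : Int) : Decidable (Pre_minOperations_median n) := by unfold Pre_minOperations_median; infer_instance
def pvWitness_minOperations_median : Int := 5

def Spec_minOperations_median (n : Int) (out : Int) : Prop := out = minOperations_median_alt n
instance (n : Int) (out : Int) : Decidable (Spec_minOperations_median n out) := by unfold Spec_minOperations_median; infer_instance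

-- ===== CLAIM (what is proved, stated in full; the proofs are below) =====
def Claim_equal_minOperations_median : Prop := ∀ (n : Int), Dom_minOperations_median n → Pre_minOperations_median n → Spec_minOperations_median n (minOperations_median n)

-- ===== LEMMAS AND PROOFS =====

-- Gauss sum: Σ_{k<N} (c + 2k) = N*c + N*(N-1)
theorem pv_gauss (c : Int) (N : Nat) :
    (List.map (fun k : Nat => c + 2 * (k : Int)) (List.range N)).sum
      = (N : Int) * c + (N : Int) * ((N : Int) - 1) := by
  induction N with
  | zero => simp
  | succ m ih =>
    rw [List.range_succ, List.map_append, List.sum_append, ih]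
    push_cast
    simp
    ring

-- The value of A's loop over range(a, b) reading arr[j] = 2j+1 and subtracting mid.
theorem pv_loop (a b mid init : Int) (h0 : 0 ≤ a) (hab : a ≤ b) :
    (PySem.List.pyRange a b 1).foldl
        (fun o j => o + (PySem.List.pyGetD ((PySem.List.pyRange 0 b 1).map (fun i => 2 * i + 1)) j 0 - mid)) init
      = init + (b - a) * (2 * a + 1 - mid) + (b - a) * (b - a - 1) := by
  rw [PySem.List.foldl_add]
  have hmap : (PySem.List.pyRange a b 1).map
      (fun j => PySem.List.pyGetD ((PySem.List.pyRange 0 b 1).map (fun i => 2 * i + 1)) j 0 - mid)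
      = (PySem.List.pyRange a b 1).map (fun j => (2 * a + 1 - mid) + 2 * (j - a)) := by
    apply List.map_congr_left
    intro j hj
    rw [PySem.List.mem_pyRange_one] at hj
    rw [PySem.List.pyGetD_map_pyRange_of_nonneg _ _ _ _ (by omega) (by omega)]
    ring
  rw [hmap, PySem.List.pyRange_one, List.map_map]
  have hfun : ((fun j => (2 * a + 1 - mid) + 2 * (j - a)) ∘ fun k : Nat => a + (k : Int))
      = fun k : Nat => (2 * a + 1 - mid) + 2 * (k : Int) := by
    funext k; simp only [Function.comp_apply]; push_cast; ring
  rw [hfun, pv_gauss]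
  have hba : ((b - a).toNat : Int) = b - a := by omega
  rw [hba]
  ring

theorem pv_floordiv4 (q r : Int) (hr0 : 0 ≤ r) (hr4 : r < 4) :
    PySem.Int.floordiv (4 * q + r) 4 = q := by
  rw [PySem.Int.floordiv_eq_iff_of_pos (by norm_num)]
  omega

-- ===== VERDICT (by name: the statement is the Claim_ definition above) =====
theorem minOperations_median_spec : Claim_equal_minOperations_median := by
  intro n _ hpre
  unfold Spec_minOperations_median minOperations_median minOperations_median_alt
  unfold Pre_minOperations_median at hpre
  by_cases h1 : n = 1
  · subst h1; decide
  · have hn2 : 2 ≤ n := by omega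
    simp only [beq_iff_eq, h1, if_false]
    rw [PySem.List.foldl_append_singleton_eq_map]
    simp only [List.nil_append]
    rcases Int.even_or_odd n with ⟨m, hm⟩ | ⟨m, hm⟩
    · -- n = m + m, m ≥ 1
      have hm1 : 1 ≤ m := by omega
      have hdvd : PySem.Int.mod n 2 = 0 := by
        rw [PySem.Int.mod_eq_zero_iff_dvd]; exact ⟨m, by omega⟩
      have hfd : PySem.Int.floordiv n 2 = m := by
        rw [PySem.Int.floordiv_eq_iff_of_pos (by norm_num)]; omega
      rw [if_pos hdvd]
      rw [hfd]
      rw [PySem.List.pyGetD_map_pyRange_of_nonneg _ _ _ _ (by omega) (by omega)]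
      rw [pv_loop _ _ _ _ (by omega) (by omega)]
      rw [show n * n = 4 * (m * m) + 0 by rw [hm]; ring,
          pv_floordiv4 _ _ (by omega) (by omega)]
      rw [hm]; ring
    · -- n = 2m + 1, m ≥ 1
      have hm1 : 1 ≤ m := by omega
      have hmod : PySem.Int.mod n 2 = 1 := by
        rcases PySem.Int.mod_two_eq n with h | h
        · exfalso
          rw [PySem.Int.mod_eq_zero_iff_dvd] at h
          rcases h with ⟨k, hk⟩; omega
        · exact h
      rw [if_neg (show ¬ PySem.Int.mod n 2 = 0 by rw [hmod]; decide)]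
      have hfd : PySem.Int.floordiv n 2 = m := by
        rw [PySem.Int.floordiv_eq_iff_of_pos (by norm_num)]; omega
      rw [hfd]
      rw [PySem.List.pyGetD_map_pyRange_of_nonneg _ _ _ _ (by omega) (by omega)]
      rw [pv_loop _ _ _ _ (by omega) (by omega)]
      rw [show n * n = 4 * (m * m + m) + 1 by rw [hm]; ring,
          pv_floordiv4 _ _ (by omega) (by omega)]
      rw [hm]; ring
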